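-- pv_equiv track=rewrite | github.com/Alex-1611/RegEx-Matcher | regex_matcher.py | first_regex_index
-- ===== SOURCE A (Python) =====
-- def first_regex_index(reg):
--     i = 1
--     j = 1
--     while i > 0:
--         char = reg[j]
--         j += 1
--
--         if char in "|+":
--             i += 1
--         elif char == '*':
--             pass
--         else:
--             i -= 1
--     return j - 1
-- ===== SOURCE B (Python) =====
-- def first_regex_index(reg):
--     # Recursive descent over the prefix-regex grammar: parse(k) returns the
--     # index of the last character of the subexpression starting at index k.
--     def parse(k):
--         c = reg[k]
--         if c in "|+":
--             return parse(parse(k + 1) + 1)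
--         if c == '*':
--             return parse(k + 1)
--         return k
--     return parse(1)
-- ===== Notes on version B (the rewrite author's own statement) =====
-- stated objective: alternative
-- what changed: A's single counter-tracking while-loop is replaced by recursive descent over the prefix-regex grammar (parse(k) returns the last index of the subexpression at k).
-- outside the precondition, e.g. on first_regex_index('|'): A raises IndexError, B raises IndexError; on first_regex_index('+'): A raises IndexError, B raises IndexError
import Mathlib
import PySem

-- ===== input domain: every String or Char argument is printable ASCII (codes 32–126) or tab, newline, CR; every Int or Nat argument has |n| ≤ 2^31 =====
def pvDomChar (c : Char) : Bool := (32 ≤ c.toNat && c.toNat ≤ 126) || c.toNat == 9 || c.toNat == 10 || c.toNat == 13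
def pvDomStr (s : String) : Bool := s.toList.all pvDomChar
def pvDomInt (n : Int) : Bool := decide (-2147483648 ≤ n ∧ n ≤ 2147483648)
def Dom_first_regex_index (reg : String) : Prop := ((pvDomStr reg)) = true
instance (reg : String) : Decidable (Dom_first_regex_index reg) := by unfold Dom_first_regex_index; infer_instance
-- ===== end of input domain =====

-- B replaces A's counter loop with recursive descent over the prefix-regex grammar
-- (alternative decomposition, same cost); return-value equivalence is proved on Pre_.

-- ===== PORT A =====
-- literal port of A's while-loop: i is the pending-operand counter, j the scan index;
-- reg[j] out of range is Python's IndexError (excluded by Pre_; the port returns 0 there).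
def firstAuxA (cs : List Char) (i : Int) (j : Nat) : Int :=
  if i > 0 then
    if h : j < cs.length then
      let c := cs[j]
      if c = '|' ∨ c = '+' then firstAuxA cs (i + 1) (j + 1)
      else if c = '*' then firstAuxA cs i (j + 1)
      else firstAuxA cs (i - 1) (j + 1)
    else 0
  else (j : Int) - 1
termination_by cs.length - j
decreasing_by all_goals omega

def first_regex_index (reg : String) : Int := firstAuxA reg.toList 1 1

-- ===== PORT B =====
-- literal port of Source B's parse(k); fuel bounds the recursion depth (each call moves the
-- index strictly right, so cs.length fuel is enough wherever the Python returns);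
-- none is Python's IndexError / exhausted input (excluded by Pre_).
def parseB (cs : List Char) : Nat → Nat → Option Nat
  | 0, _ => none
  | fuel + 1, k =>
    if h : k < cs.length then
      let c := cs[k]
      if c = '|' ∨ c = '+' then
        match parseB cs fuel (k + 1) with
        | some m => parseB cs fuel (m + 1)
        | none => none
      else if c = '*' then parseB cs fuel (k + 1)
      else some k
    else none

def first_regex_index_alt (reg : String) : Int :=
  match parseB reg.toList reg.toList.length 1 with
  | some m => (m : Int)
  | none => 0

-- ===== PRECONDITION & SPEC =====
-- delta c is the step A's counter takes on character c; balS cs n is the counter change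
-- over the first n characters.
def delta (c : Char) : Int := if c = '|' ∨ c = '+' then 1 else if c = '*' then 0 else -1

def balS (cs : List Char) (n : Nat) : Int := ((cs.take n).map delta).sum

-- Pre_ holds exactly when A's counter (started at 1 after skipping reg[0]) reaches 0
-- within the string, i.e. some slice reg[1:j] has one more terminal than '|'/'+' operators;
-- otherwise Python A (and B) raise IndexError.
def Pre_first_regex_index (reg : String) : Prop :=
  ∃ j ∈ Finset.Icc 1 reg.toList.length, balS reg.toList j - balS reg.toList 1 = -1

instance (reg : String) : Decidable (Pre_first_regex_index reg) := by
  unfold Pre_first_regex_index; infer_instance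

def pvWitness_first_regex_index : String := "?ab"

def Spec_first_regex_index (reg : String) (out : Int) : Prop := out = first_regex_index_alt reg
instance (reg : String) (out : Int) : Decidable (Spec_first_regex_index reg out) := by unfold Spec_first_regex_index; infer_instance

-- ===== CLAIM (what is proved, stated in full; the proofs are below) =====
def Claim_equal_first_regex_index : Prop := ∀ (reg : String), Dom_first_regex_index reg → Pre_first_regex_index reg → Spec_first_regex_index reg (first_regex_index reg)

-- ===== LEMMAS AND PROOFS =====

lemma delta_ge (c : Char) : -1 ≤ delta c := by
  unfold delta; split_ifs <;> norm_num

lemma balS_succ (cs : List Char) (n : Nat) (h : n < cs.length) :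
    balS cs (n + 1) = balS cs n + delta cs[n] := by
  have ht : cs.take (n + 1) = cs.take n ++ [cs[n]] := by
    rw [List.take_add_one, List.getElem?_eq_getElem h]
    rfl
  unfold balS
  rw [ht, List.map_append, List.sum_append]
  simp

-- discrete intermediate-value step: if the running balance from k ever reaches -1 or
-- below by j, there is a first index t where it is exactly -1, nonnegative before.
lemma first_hit (cs : List Char) (k j : Nat) (hk : k ≤ j) (hj : j ≤ cs.length)
    (hC : balS cs j - balS cs k ≤ -1) :
    ∃ t, k < t ∧ t ≤ j ∧ balS cs t - balS cs k = -1 ∧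
      ∀ u, k ≤ u → u < t → 0 ≤ balS cs u - balS cs k := by
  classical
  have hP : ∃ t, k ≤ t ∧ t ≤ j ∧ balS cs t - balS cs k ≤ -1 := ⟨j, hk, le_refl _, hC⟩
  let t0 := Nat.find hP
  have ht0 : k ≤ t0 ∧ t0 ≤ j ∧ balS cs t0 - balS cs k ≤ -1 := Nat.find_spec hP
  have hmin : ∀ u, u < t0 → ¬(k ≤ u ∧ u ≤ j ∧ balS cs u - balS cs k ≤ -1) :=
    fun u hu => Nat.find_min hP hu
  have hkt : k < t0 := by
    rcases Nat.lt_or_ge k t0 with h1 | h1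
    · exact h1
    · have : t0 = k := le_antisymm h1 ht0.1
      rw [this] at ht0; omega
  have hpos : ∀ u, k ≤ u → u < t0 → 0 ≤ balS cs u - balS cs k := by
    intro u hku hu
    have hm := hmin u hu
    have huj : u ≤ j := le_trans (le_of_lt hu) ht0.2.1
    by_contra hc
    exact hm ⟨hku, huj, by omega⟩
  have ht1 : t0 - 1 < cs.length := by omega
  have hstep : balS cs t0 = balS cs (t0 - 1) + delta (cs[t0 - 1]'ht1) := by
    have heq : t0 - 1 + 1 = t0 := by omega
    have hb := balS_succ cs (t0 - 1) ht1
    rw [heq] at hb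
    exact hb.symm ▸ rfl
  have hprev : 0 ≤ balS cs (t0 - 1) - balS cs k := hpos (t0 - 1) (by omega) (by omega)
  have hd := delta_ge (cs[t0 - 1]'ht1)
  exact ⟨t0, hkt, ht0.2.1, by omega, hpos⟩

-- if parse succeeds from k with result m, A's loop from k with counter i+1 continues
-- as the loop from m+1 with counter i.
lemma parse_firstAux (cs : List Char) :
    ∀ fuel k m, parseB cs fuel k = some m →
      ∀ i : Int, 0 ≤ i → firstAuxA cs (i + 1) k = firstAuxA cs i (m + 1) := by
  intro fuel
  induction fuel with
  | zero => intro k m h; simp [parseB] at h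
  | succ fuel ih =>
    intro k m h i hi
    rw [parseB] at h
    by_cases hk : k < cs.length
    · rw [dif_pos hk] at h
      simp only at h
      rw [firstAuxA, if_pos (by omega : i + 1 > 0), dif_pos hk]
      by_cases h1 : cs[k] = '|' ∨ cs[k] = '+'
      · rw [if_pos h1] at h ⊢
        cases h2 : parseB cs fuel (k + 1) with
        | none => rw [h2] at h; simp at h
        | some m1 =>
          rw [h2] at h
          simp only at h
          have e1 := ih (k + 1) m1 h2 (i + 1) (by omega)
          have e2 := ih (m1 + 1) m h i hi
          calc firstAuxA cs (i + 1 + 1) (k + 1) = firstAuxA cs (i + 1) (m1 + 1) := e1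
            _ = firstAuxA cs i (m + 1) := e2
      · rw [if_neg h1] at h ⊢
        by_cases h2 : cs[k] = '*'
        · rw [if_pos h2] at h ⊢
          exact ih (k + 1) m h i hi
        · rw [if_neg h2] at h ⊢
          have : m = k := by simpa using h.symm
          subst this
          have : i + 1 - 1 = i := by omega
          rw [this]
    · rw [dif_neg hk] at h; simp at h

-- success of parse: if the balance from k first hits -1 exactly at j (nonnegative before),
-- parse returns j - 1 given fuel ≥ j - k.
lemma parse_of_bal (cs : List Char) :
    ∀ fuel k j, k < j → j ≤ cs.length → j - k ≤ fuel →
      balS cs j - balS cs k = -1 →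
      (∀ u, k ≤ u → u < j → 0 ≤ balS cs u - balS cs k) →
      parseB cs fuel k = some (j - 1) := by
  intro fuel
  induction fuel with
  | zero => intro k j hkj _ hf _ _; omega
  | succ fuel ih =>
    intro k j hkj hj hf hbal hpos
    have hk : k < cs.length := by omega
    have hstep : balS cs (k + 1) = balS cs k + delta cs[k] := balS_succ cs k hk
    rw [parseB, dif_pos hk]
    simp only
    by_cases h1 : cs[k] = '|' ∨ cs[k] = '+'
    · rw [if_pos h1]
      have hd : delta cs[k] = 1 := by unfold delta; rw [if_pos h1]
      -- balance from k+1 reaches -2 at j; find the first -1 point t0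
      have hC : balS cs j - balS cs (k + 1) ≤ -1 := by omega
      have hk1j : k + 1 ≤ j := hkj
      obtain ⟨t0, ht0k, ht0j, ht0bal, ht0pos⟩ := first_hit cs (k + 1) j hk1j hj hC
      have ht0lt : t0 < j := by
        rcases Nat.lt_or_ge t0 j with h | h
        · exact h
        · have : t0 = j := le_antisymm ht0j h
          subst this; omega
      have e1 : parseB cs fuel (k + 1) = some (t0 - 1) :=
        ih (k + 1) t0 ht0k (le_trans ht0j hj) (by omega) (by omega) ht0pos
      rw [e1]
      simp only
      have ht0pos' : 1 ≤ t0 := by omega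
      have hrw : t0 - 1 + 1 = t0 := by omega
      rw [hrw]
      apply ih t0 j ht0lt hj (by omega) (by omega)
      intro u hu huj
      have h1' := hpos u (by omega) huj
      omega
    · rw [if_neg h1]
      by_cases h2 : cs[k] = '*'
      · rw [if_pos h2]
        have hd : delta cs[k] = 0 := by unfold delta; rw [if_neg h1, if_pos h2]
        have hk1j : k + 1 < j := by
          rcases Nat.lt_or_ge (k + 1) j with h | h
          · exact h
          · have : j = k + 1 := by omega
            subst this; omega
        apply ih (k + 1) j hk1j hj (by omega) (by omega)
        intro u hu huj
        have := hpos u (by omega) huj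
        omega
      · rw [if_neg h2]
        have hd : delta cs[k] = -1 := by unfold delta; rw [if_neg h1, if_neg h2]
        have hj1 : j = k + 1 := by
          rcases Nat.lt_or_ge (k + 1) j with h | h
          · have := hpos (k + 1) (by omega) h
            omega
          · omega
        subst hj1
        simp

-- ===== VERDICT (by name: the statement is the Claim_ definition above) =====
theorem first_regex_index_spec : Claim_equal_first_regex_index := by
  intro reg _ hpre
  unfold Spec_first_regex_index first_regex_index first_regex_index_alt
  obtain ⟨j, hjmem, hbal⟩ := hpre
  rw [Finset.mem_Icc] at hjmem
  obtain ⟨t0, ht0k, ht0j, ht0bal, ht0pos⟩ :=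
    first_hit reg.toList 1 j hjmem.1 hjmem.2 (by omega)
  have hparse : parseB reg.toList reg.toList.length 1 = some (t0 - 1) :=
    parse_of_bal reg.toList reg.toList.length 1 t0 ht0k (le_trans ht0j hjmem.2) (by omega) ht0bal ht0pos
  rw [hparse]
  simp only
  have e1 := parse_firstAux reg.toList reg.toList.length 1 (t0 - 1) hparse 0 (le_refl 0)
  have hrw : t0 - 1 + 1 = t0 := by omega
  rw [hrw] at e1
  rw [show (0 : Int) + 1 = 1 from rfl] at e1
  rw [e1, firstAuxA]
  simp only [if_neg (by omega : ¬((0:Int) > 0))]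
  omega
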